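-- pv_equiv track=rewrite | github.com/Hilyme/Python-Quantitative_Indicators | finance_utils/entangling_theory.py | get_aa21_list
-- ===== SOURCE A (Python) =====
-- def get_aa21_list(pa, low_list):
--     aa21_list = []
--     for i in range(2 * pa, len(low_list)):
--         if low_list[i - pa] == min(low_list[i - 2 * pa: i]):
--             aa21_list.append(True)
--         else:
--             aa21_list.append(False)
--     return aa21_list
-- ===== SOURCE B (Python) =====
-- def get_aa21_list(pa, low_list):
--     # Monotonic-queue sliding-window minimum: one pass over the list.
--     if pa <= 0:
--         return []
--     w = 2 * pa
--     if len(low_list) <= w: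
--         return []
--     out = []
--     dq = []    # indices of a strictly increasing run of values; dq[head:] is live
--     head = 0
--     for i in range(len(low_list)):
--         if i >= w:
--             out.append(low_list[i - pa] == low_list[dq[head]])
--         while len(dq) > head and low_list[dq[-1]] >= low_list[i]:
--             dq.pop()
--         dq.append(i)
--         if dq[head] <= i - w:
--             head += 1
--     return out
-- ===== Notes on version B (the rewrite author's own statement) =====
-- stated objective: alternative
-- what changed: Replaced the per-position min() over a 2*pa slice with a single-pass monotonic-queue sliding-window minimum (list plus head pointer), so each element is pushed and popped at most once.
-- crash fix: For pa < 0 A always raises (ValueError from min() of an empty slice or IndexError from an out-of-range index), and for pa = 0 with a nonempty list A raises ValueError; B returns [] there, the natural value for a non-positive window size. — e.g. on get_aa21_list(0, [1]): A raises ValueError, B returns []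
import Mathlib
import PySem

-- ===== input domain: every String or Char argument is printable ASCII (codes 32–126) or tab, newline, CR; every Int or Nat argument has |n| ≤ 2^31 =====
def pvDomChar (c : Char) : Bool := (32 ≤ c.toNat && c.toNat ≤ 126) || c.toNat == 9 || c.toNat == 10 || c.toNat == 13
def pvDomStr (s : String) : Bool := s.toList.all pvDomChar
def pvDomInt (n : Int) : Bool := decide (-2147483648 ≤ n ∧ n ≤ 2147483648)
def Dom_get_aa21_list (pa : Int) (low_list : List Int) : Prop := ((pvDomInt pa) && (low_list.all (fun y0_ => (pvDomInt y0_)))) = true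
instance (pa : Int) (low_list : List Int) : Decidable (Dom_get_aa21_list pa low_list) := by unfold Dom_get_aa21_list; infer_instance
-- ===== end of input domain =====

-- B replaces A's per-position min() over a 2*pa slice by a one-pass monotonic-queue
-- sliding-window minimum (an alternative algorithm; each element is pushed/popped once).

-- ===== PORT A =====
def get_aa21_list (pa : Int) (low_list : List Int) : List Bool :=
  (PySem.List.pyRange (2 * pa) (low_list.length : Int) 1).foldl
    (fun acc i =>
      if PySem.List.pyGet? low_list (i - pa) =
         PySem.List.min? (PySem.List.slice low_list (some (i - 2 * pa)) (some i)) (fun x => x)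
      then acc ++ [true] else acc ++ [false]) []

-- ===== PORT B =====
-- while len(dq) > head and low_list[dq[-1]] >= x: dq.pop()
def altPopWhile (low : List Int) (x : Int) (head : Nat) (dq : List Int) : List Int :=
  if h : head < dq.length ∧ x ≤ PySem.List.pyGetD low (PySem.List.pyGetD dq (-1) 0) 0 then
    altPopWhile low x head dq.dropLast
  else dq
  termination_by dq.length
  decreasing_by
    obtain ⟨h1, -⟩ := h
    simp only [List.length_dropLast]
    omega

-- one iteration of B's `for i in range(len(low_list))` loop; state = (out, dq, head)
def altStep (low : List Int) (pa w : Int) (st : List Bool × List Int × Nat) (i : Nat) :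
    List Bool × List Int × Nat :=
  let out := st.1
  let dq := st.2.1
  let head := st.2.2
  let out := if w ≤ (i : Int) then
      out ++ [decide (PySem.List.pyGetD low ((i : Int) - pa) 0 =
                      PySem.List.pyGetD low (PySem.List.pyGetD dq (head : Int) 0) 0)]
    else out
  let dq := altPopWhile low (PySem.List.pyGetD low (i : Int) 0) head dq ++ [(i : Int)]
  let head := if PySem.List.pyGetD dq (head : Int) 0 ≤ (i : Int) - w then head + 1 else head
  (out, dq, head)

def get_aa21_list_alt (pa : Int) (low_list : List Int) : List Bool :=
  if pa ≤ 0 then []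
  else if (low_list.length : Int) ≤ 2 * pa then []
  else ((List.range low_list.length).foldl (altStep low_list pa (2 * pa)) ([], [], 0)).1

-- ===== PRECONDITION & SPEC =====
-- Pre_ excludes exactly the inputs on which A raises: pa < 0 (ValueError or IndexError),
-- and pa = 0 with a nonempty list (ValueError from min of an empty slice).
def Pre_get_aa21_list (pa : Int) (low_list : List Int) : Prop :=
  1 ≤ pa ∨ (pa = 0 ∧ low_list = [])
instance (pa : Int) (low_list : List Int) : Decidable (Pre_get_aa21_list pa low_list) := by
  unfold Pre_get_aa21_list; infer_instance

def pvWitness_get_aa21_list : Int × List Int := (1, [3, 1, 2, 1, 5])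

-- On pa < 0, and on pa = 0 with a nonempty list, A raises (ValueError/IndexError); B returns [].
def Raises_get_aa21_list (pa : Int) (low_list : List Int) : Prop :=
  pa < 0 ∨ (pa = 0 ∧ low_list ≠ [])
instance (pa : Int) (low_list : List Int) : Decidable (Raises_get_aa21_list pa low_list) := by
  unfold Raises_get_aa21_list; infer_instance

def pvRaiseWitness_get_aa21_list : Int × List Int := (0, [1])
def pvRaiseWitnessOut_get_aa21_list : List Bool := []

def Spec_get_aa21_list (pa : Int) (low_list : List Int) (out : List Bool) : Prop :=
  out = get_aa21_list_alt pa low_list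
instance (pa : Int) (low_list : List Int) (out : List Bool) : Decidable (Spec_get_aa21_list pa low_list out) := by
  unfold Spec_get_aa21_list; infer_instance

-- ===== CLAIM (what is proved, stated in full; the proofs are below) =====
def Claim_equal_get_aa21_list : Prop := ∀ (pa : Int) (low_list : List Int), Dom_get_aa21_list pa low_list → Pre_get_aa21_list pa low_list → Spec_get_aa21_list pa low_list (get_aa21_list pa low_list)
def Claim_raises_get_aa21_list : Prop := (∀ (pa : Int) (low_list : List Int), Dom_get_aa21_list pa low_list → Raises_get_aa21_list pa low_list → ¬ Pre_get_aa21_list pa low_list) ∧ (Dom_get_aa21_list (pvRaiseWitness_get_aa21_list.1) (pvRaiseWitness_get_aa21_list.2) ∧ Raises_get_aa21_list (pvRaiseWitness_get_aa21_list.1) (pvRaiseWitness_get_aa21_list.2) ∧ get_aa21_list_alt (pvRaiseWitness_get_aa21_list.1) (pvRaiseWitness_get_aa21_list.2) = pvRaiseWitnessOut_get_aa21_list)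

-- ===== LEMMAS AND PROOFS =====

-- value of the list at a Nat index (all indices used are in range)
def pvVal (low : List Int) (j : Nat) : Int := low.getD j 0

-- the flag A computes at output position t (W = 2*pa, P = pa, both as Nat):
-- low[t-P] is a minimum of the window [t-W, t)
def pvFlag (low : List Int) (P W t : Nat) : Bool :=
  decide (∀ k ∈ List.range' (t - W) W, pvVal low (t - P) ≤ pvVal low k)

-- the live part of B's monotonic queue before iteration i: window indices j
-- such that every later window index carries a strictly larger value
def pvAct (low : List Int) (W i : Nat) : List Nat :=
  (List.range i).filter
    (fun j => decide (i ≤ j + W) &&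
      (List.range' (j + 1) (i - (j + 1))).all (fun k => decide (pvVal low j < pvVal low k)))

-- strip from the back of an index list all indices whose value is ≥ x
def pvRstrip (low : List Int) (x : Int) (l : List Int) : List Int :=
  (l.reverse.dropWhile (fun j => decide (x ≤ PySem.List.pyGetD low j 0))).reverse

theorem dropWhile_decr (g : Int → Int) (x : Int) (l : List Int)
    (hp : l.Pairwise (fun a b => g b < g a)) :
    l.dropWhile (fun j => decide (x ≤ g j)) = l.filter (fun j => decide (g j < x)) := by
  induction l with
  | nil => rfl
  | cons y t ih =>
    rcases List.pairwise_cons.1 hp with ⟨hy, ht⟩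
    by_cases hxy : x ≤ g y
    · rw [List.dropWhile_cons_of_pos (by simpa using hxy),
        List.filter_cons_of_neg (by simpa using not_lt.2 hxy)]
      exact ih ht
    · rw [List.dropWhile_cons_of_neg (by simpa using hxy),
        List.filter_cons_of_pos (by simpa using not_le.1 hxy)]
      congr 1
      rw [List.filter_eq_self.2]
      intro a ha
      simp only [decide_eq_true_eq]
      exact lt_trans (hy a ha) (not_le.1 hxy)

theorem pop_eq (low : List Int) (x : Int) (dead act : List Int) :
    altPopWhile low x dead.length (dead ++ act) = dead ++ pvRstrip low x act := by
  induction act using List.reverseRecOn with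
  | nil =>
    rw [altPopWhile]
    rw [dif_neg]
    · simp [pvRstrip]
    · simp
  | append_singleton ys y ih =>
    rw [altPopWhile]
    have hlast : PySem.List.pyGetD (dead ++ (ys ++ [y])) (-1) 0 = y := by
      rw [← List.append_assoc]
      exact PySem.List.pyGetD_neg_one_append_singleton _ _ _
    by_cases hxy : x ≤ PySem.List.pyGetD low y 0
    · rw [dif_pos ⟨by simp only [List.length_append, List.length_cons, List.length_nil]; omega,
        by rw [hlast]; exact hxy⟩]
      have hdl : (dead ++ (ys ++ [y])).dropLast = dead ++ ys := by
        rw [← List.append_assoc, List.dropLast_concat]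
      rw [hdl, ih]
      congr 1
      simp only [pvRstrip, List.reverse_append, List.reverse_cons, List.reverse_nil,
        List.nil_append, List.cons_append]
      rw [List.dropWhile_cons_of_pos (by simpa using hxy)]
    · rw [dif_neg (by rintro ⟨-, h2⟩; rw [hlast] at h2; exact hxy h2)]
      congr 1
      simp only [pvRstrip, List.reverse_append, List.reverse_cons, List.reverse_nil,
        List.nil_append, List.cons_append]
      rw [List.dropWhile_cons_of_neg (by simpa using hxy)]
      simp

theorem rstrip_eq_filter (low : List Int) (x : Int) (l : List Int)
    (h : l.Pairwise (fun a b => PySem.List.pyGetD low a 0 < PySem.List.pyGetD low b 0)) :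
    pvRstrip low x l = l.filter (fun j => decide (PySem.List.pyGetD low j 0 < x)) := by
  unfold pvRstrip
  rw [dropWhile_decr _ _ _ (by rw [List.pairwise_reverse]; exact h)]
  rw [← List.filter_reverse, List.reverse_reverse]

theorem mem_act (low : List Int) (W i j : Nat) :
    j ∈ pvAct low W i ↔ j < i ∧ i ≤ j + W ∧ ∀ k, j < k → k < i → pvVal low j < pvVal low k := by
  simp only [pvAct, List.mem_filter, List.mem_range, Bool.and_eq_true, decide_eq_true_eq,
    List.all_eq_true, List.mem_range'_1]
  constructor
  · rintro ⟨h1, h2, h3⟩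
    exact ⟨h1, h2, fun k hk1 hk2 => h3 k ⟨by omega, by omega⟩⟩
  · rintro ⟨h1, h2, h3⟩
    exact ⟨h1, h2, fun k hk => h3 k (by omega) (by omega)⟩

theorem act_pairwise (low : List Int) (W i : Nat) : (pvAct low W i).Pairwise (· < ·) := by
  exact List.Pairwise.filter _ (List.pairwise_lt_range)

theorem exists_last_argmin (low : List Int) (l : List Nat) (hne : l ≠ []) (hp : l.Pairwise (· < ·)) :
    ∃ m ∈ l, (∀ j ∈ l, pvVal low m ≤ pvVal low j) ∧ ∀ j ∈ l, m < j → pvVal low m < pvVal low j := by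
  induction l with
  | nil => exact absurd rfl hne
  | cons x xs ih =>
    rcases List.pairwise_cons.1 hp with ⟨hx, hxs⟩
    by_cases hxe : xs = []
    · subst hxe
      refine ⟨x, List.mem_cons_self, ?_, ?_⟩
      · intro j hj; rcases List.mem_cons.1 hj with rfl | hj
        · exact le_refl _
        · simp at hj
      · intro j hj; rcases List.mem_cons.1 hj with rfl | hj
        · omega
        · simp at hj
    · obtain ⟨m, hm, hmin, hlast⟩ := ih hxe hxs
      by_cases hc : pvVal low m ≤ pvVal low x
      · refine ⟨m, List.mem_cons_of_mem _ hm, ?_, ?_⟩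
        · intro j hj; rcases List.mem_cons.1 hj with rfl | hj
          · exact hc
          · exact hmin j hj
        · intro j hj hmj; rcases List.mem_cons.1 hj with rfl | hj
          · exact absurd hmj (by have := hx m hm; omega)
          · exact hlast j hj hmj
      · rw [not_le] at hc
        refine ⟨x, List.mem_cons_self, ?_, ?_⟩
        · intro j hj; rcases List.mem_cons.1 hj with rfl | hj
          · exact le_refl _
          · exact le_of_lt (lt_of_lt_of_le hc (hmin j hj))
        · intro j hj hmj; rcases List.mem_cons.1 hj with rfl | hj
          · omega
          · exact lt_of_lt_of_le hc (hmin j hj)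

theorem act_val_pairwise (low : List Int) (W i : Nat) :
    (pvAct low W i).Pairwise (fun a b => pvVal low a < pvVal low b) := by
  refine List.Pairwise.imp_of_mem ?_ (act_pairwise low W i)
  intro a b ha hb hab
  obtain ⟨-, -, hgood⟩ := (mem_act low W i a).1 ha
  obtain ⟨hbi, -, -⟩ := (mem_act low W i b).1 hb
  exact hgood b hab hbi

theorem act_head_min (low : List Int) (W i : Nat) (hW : 0 < W) (hi : W ≤ i) :
    ∃ h t, pvAct low W i = h :: t ∧ ∀ k ∈ List.range' (i - W) W, pvVal low h ≤ pvVal low k := by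
  have hws_pair : (List.range' (i - W) W).Pairwise (· < ·) := by
    rw [List.range'_eq_map_range]
    exact List.pairwise_lt_range.map _ (fun a b h => by omega)
  have hne : List.range' (i - W) W ≠ [] := by
    intro hnil
    have h1 : (List.range' (i - W) W).length = W := List.length_range'
    rw [hnil] at h1; simp at h1; omega
  obtain ⟨m, hm, hmin, hlast⟩ := exists_last_argmin low _ hne hws_pair
  rw [List.mem_range'_1] at hm
  have hmact : m ∈ pvAct low W i := by
    rw [mem_act]
    refine ⟨by omega, by omega, fun k hk1 hk2 => ?_⟩
    exact hlast k (List.mem_range'_1.2 ⟨by omega, by omega⟩) hk1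
  cases hact : pvAct low W i with
  | nil => rw [hact] at hmact; simp at hmact
  | cons h t =>
    have hpw := act_pairwise low W i
    rw [hact, List.pairwise_cons] at hpw
    have hmem : m = h ∨ m ∈ t := by
      rw [hact] at hmact; exact List.mem_cons.1 hmact
    have hhm : h = m := by
      rcases hmem with rfl | hmt
      · rfl
      · exfalso
        have hhlt : h < m := hpw.1 m hmt
        have hhact : h ∈ pvAct low W i := by rw [hact]; exact List.mem_cons_self
        obtain ⟨hhi, hhw, hhgood⟩ := (mem_act low W i h).1 hhact
        have h1 : pvVal low h < pvVal low m := hhgood m hhlt (by omega)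
        have h2 : pvVal low m ≤ pvVal low h :=
          hmin h (List.mem_range'_1.2 ⟨by omega, by omega⟩)
        omega
    subst hhm
    exact ⟨h, t, rfl, hmin⟩

theorem act_succ (low : List Int) (W i : Nat) (hW : 0 < W) :
    pvAct low W (i + 1) =
      (pvAct low W i).filter (fun j => decide (i + 1 ≤ j + W ∧ pvVal low j < pvVal low i)) ++ [i] := by
  unfold pvAct
  rw [List.range_succ, List.filter_append, List.filter_filter]
  congr 1
  · apply List.filter_congr
    intro j hj
    rw [List.mem_range] at hj
    have hr : List.range' (j + 1) (i + 1 - (j + 1)) = List.range' (j + 1) (i - (j + 1)) ++ [i] := by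
      have h1 : i + 1 - (j + 1) = (i - (j + 1)) + 1 := by omega
      rw [h1, List.range'_concat]
      have h2 : j + 1 + 1 * (i - (j + 1)) = i := by omega
      rw [h2]
    rw [hr, Bool.eq_iff_iff]
    simp only [List.all_append, List.all_cons, List.all_nil, Bool.and_eq_true, Bool.and_true,
      decide_eq_true_eq, List.all_eq_true]
    constructor
    · rintro ⟨h1, h2, h3⟩
      exact ⟨⟨by omega, h3⟩, by omega, h2⟩
    · rintro ⟨⟨hq1, hq2⟩, hp1, hp2⟩
      exact ⟨hq1, hp2, hq2⟩
  · have h1 : i + 1 - (i + 1) = 0 := by omega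
    simp only [h1, List.filter_cons, List.filter_nil, List.range'_zero, List.all_nil,
      Bool.and_true, decide_eq_true_eq]
    rw [if_pos (by omega : i + 1 ≤ i + W)]

def pvLoop (low : List Int) (pa : Int) (i : Nat) : List Bool × List Int × Nat :=
  (List.range i).foldl (altStep low pa (2 * pa)) ([], [], 0)

theorem getD_drop_zero (l : List Int) (n : Nat) : l.getD n 0 = (l.drop n).getD 0 0 := by
  rw [List.getD_eq_getElem?_getD, List.getD_eq_getElem?_getD, List.getElem?_drop]
  norm_num

theorem alt_invariant (low : List Int) (pa : Int) (hpa : 1 ≤ pa) (i : Nat) :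
    (pvLoop low pa i).2.2 ≤ (pvLoop low pa i).2.1.length ∧
    (pvLoop low pa i).2.1.drop (pvLoop low pa i).2.2 =
      (pvAct low (2 * pa).toNat i).map (Nat.cast : Nat → Int) ∧
    (pvLoop low pa i).1 =
      (List.range' (2 * pa).toNat (i - (2 * pa).toNat)).map (pvFlag low pa.toNat (2 * pa).toNat) := by
  set W := (2 * pa).toNat with hWdef
  set P := pa.toNat with hPdef
  have hW2 : W = 2 * P := by omega
  have hP1 : 1 ≤ P := by omega
  induction i with
  | zero =>
    refine ⟨by simp [pvLoop], ?_, by simp [pvLoop]⟩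
    simp [pvLoop, pvAct]
  | succ i ih =>
    obtain ⟨h1, h2, h3⟩ := ih
    have hstep : pvLoop low pa (i + 1) = altStep low pa (2 * pa) (pvLoop low pa i) i := by
      rw [pvLoop, List.range_succ, List.foldl_append, List.foldl_cons, List.foldl_nil]; rfl
    set dq := (pvLoop low pa i).2.1 with hdq
    set head := (pvLoop low pa i).2.2 with hhead
    set out := (pvLoop low pa i).1 with hout
    set G := (pvAct low W i).filter (fun j => decide (pvVal low j < pvVal low i)) with hGdef
    have hx : PySem.List.pyGetD low (i : Int) 0 = pvVal low i := by
      rw [PySem.List.pyGetD_natCast]; rfl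
    have hdead : (dq.take head).length = head := by rw [List.length_take]; omega
    have hsplit : dq = dq.take head ++ (pvAct low W i).map (Nat.cast : Nat → Int) := by
      conv_lhs => rw [← List.take_append_drop head dq]
      rw [h2]
    have hpop : altPopWhile low (pvVal low i) head dq =
        dq.take head ++ pvRstrip low (pvVal low i) ((pvAct low W i).map (Nat.cast : Nat → Int)) := by
      have h0 := pop_eq low (pvVal low i) (dq.take head) ((pvAct low W i).map (Nat.cast : Nat → Int))
      rw [hdead, ← hsplit] at h0
      exact h0
    have hpairs : ((pvAct low W i).map (Nat.cast : Nat → Int)).Pairwise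
        (fun a b => PySem.List.pyGetD low a 0 < PySem.List.pyGetD low b 0) := by
      rw [List.pairwise_map]
      refine (act_val_pairwise low W i).imp ?_
      intro a b hab
      simpa [PySem.List.pyGetD_natCast, pvVal] using hab
    have hfil : pvRstrip low (pvVal low i) ((pvAct low W i).map (Nat.cast : Nat → Int)) =
        G.map (Nat.cast : Nat → Int) := by
      rw [rstrip_eq_filter _ _ _ hpairs, List.filter_map, hGdef]
      congr 1
      apply List.filter_congr
      intro j _
      simp [PySem.List.pyGetD_natCast, pvVal]
    have hDeq : altPopWhile low (PySem.List.pyGetD low (i : Int) 0) head dq ++ [(i : Int)] =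
        dq.take head ++ (G.map (Nat.cast : Nat → Int) ++ [(i : Int)]) := by
      rw [hx, hpop, hfil, List.append_assoc]
    set D : List Int := dq.take head ++ (G.map (Nat.cast : Nat → Int) ++ [(i : Int)]) with hDdef
    have hdropD : D.drop head = G.map (Nat.cast : Nat → Int) ++ [(i : Int)] := by
      have h0 : (dq.take head ++ (G.map (Nat.cast : Nat → Int) ++ [(i : Int)])).drop
          ((dq.take head).length) = G.map (Nat.cast : Nat → Int) ++ [(i : Int)] := List.drop_left
      rw [hdead] at h0
      exact h0
    have hfrontD : D.getD head 0 = (G.map (Nat.cast : Nat → Int) ++ [(i : Int)]).getD 0 0 := by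
      rw [getD_drop_zero, hdropD]
    have hGmem : ∀ j ∈ G, j < i ∧ i ≤ j + W := by
      intro j hj
      have hj' := List.mem_of_mem_filter hj
      obtain ⟨ha, hb, -⟩ := (mem_act low W i j).1 hj'
      exact ⟨ha, hb⟩
    have hGpair : G.Pairwise (· < ·) := (act_pairwise low W i).filter _
    -- the new deque and head pointer
    have hsucc : (pvAct low W (i + 1)).map (Nat.cast : Nat → Int) =
        (G.filter (fun j => decide (i + 1 ≤ j + W))).map (Nat.cast : Nat → Int) ++ [(i : Int)] := by
      rw [act_succ low W i (by omega), List.map_append, hGdef, List.filter_filter]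
      congr 2
      apply List.filter_congr
      intro j _
      simp [Bool.and_comm]
    have hDlen : D.length = head + (G.length + 1) := by
      rw [hDdef]
      simp [hdead]
    have hmain : ∀ hd : Nat,
        (hd = if D.getD head 0 ≤ (i : Int) - 2 * pa then head + 1 else head) →
        hd ≤ D.length ∧ D.drop hd = (pvAct low W (i + 1)).map (Nat.cast : Nat → Int) := by
      intro hd hhd
      have hcastW : 2 * pa = (W : Int) := by omega
      cases hGcase : G with
      | nil =>
        rw [hGcase] at hfrontD
        simp only [List.map_nil, List.nil_append, List.getD_cons_zero] at hfrontD
        rw [hfrontD, if_neg (by omega)] at hhd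
        subst hhd
        refine ⟨by omega, ?_⟩
        rw [hdropD, hGcase, hsucc, hGcase]
        simp
      | cons g gt =>
        obtain ⟨hgi, hgW⟩ := hGmem g (by rw [hGcase]; exact List.mem_cons_self)
        have hgtall : ∀ j ∈ gt, i + 1 ≤ j + W := by
          intro j hj
          have hgj : g < j := by
            have hp := hGpair
            rw [hGcase, List.pairwise_cons] at hp
            exact hp.1 j hj
          omega
        have hfilgt : gt.filter (fun j => decide (i + 1 ≤ j + W)) = gt := by
          rw [List.filter_eq_self]
          intro j hj
          simpa using hgtall j hj
        rw [hGcase] at hfrontD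
        simp only [List.map_cons, List.cons_append, List.getD_cons_zero] at hfrontD
        rw [hfrontD] at hhd
        by_cases hc : g + W ≤ i
        · rw [if_pos (by rw [hcastW]; omega)] at hhd
          subst hhd
          refine ⟨by rw [hDlen, hGcase]; simp, ?_⟩
          have hdd : D.drop (head + 1) = (D.drop head).drop 1 := by
            rw [List.drop_drop]
          rw [hdd, hdropD, hGcase, hsucc, hGcase]
          rw [List.filter_cons_of_neg (by simpa using (by omega : ¬ (i + 1 ≤ g + W))), hfilgt]
          simp
        · rw [if_neg (by rw [hcastW]; omega)] at hhd
          subst hhd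
          refine ⟨by omega, ?_⟩
          rw [hdropD, hGcase, hsucc, hGcase]
          rw [List.filter_cons_of_pos (by simpa using (by omega : i + 1 ≤ g + W)), hfilgt]
    have hx' : PySem.List.pyGetD low (i : Int) 0 = low.getD i 0 := by
      rw [PySem.List.pyGetD_natCast]
    have hDeq2 : altPopWhile low (low.getD i 0) (pvLoop low pa i).2.2 (pvLoop low pa i).2.1 ++
        [(i : Int)] = D := by
      rw [← hx']
      exact hDeq
    have hout3 : (pvLoop low pa i).1 = List.map (pvFlag low P W) (List.range' W (i - W)) := h3
    rw [hstep]
    simp only [altStep, PySem.List.pyGetD_natCast]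
    refine ⟨?_, ?_, ?_⟩
    · rw [hDeq2]
      exact (hmain _ rfl).1
    · rw [hDeq2]
      exact (hmain _ rfl).2
    · by_cases hWi : 2 * pa ≤ (i : Int)
      · rw [if_pos hWi]
        obtain ⟨h, t, hact, hmin⟩ := act_head_min low W i (by omega) (by omega)
        have hfront : dq.getD head 0 = (h : Int) := by
          rw [getD_drop_zero, h2, hact]
          simp
        rw [hfront, PySem.List.pyGetD_natCast]
        have hidx : (i : Int) - pa = ((i - P : Nat) : Int) := by omega
        rw [hidx, PySem.List.pyGetD_natCast]
        rw [hout3, show i + 1 - W = (i - W) + 1 by omega, List.range'_concat,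
          show W + 1 * (i - W) = i by omega, List.map_append]
        congr 1
        simp only [List.map_cons, List.map_nil, pvFlag]
        congr 1
        rw [decide_eq_decide]
        have hhw : h ∈ List.range' (i - W) W := by
          obtain ⟨hhi, hhW, -⟩ := (mem_act low W i h).1 (by rw [hact]; exact List.mem_cons_self)
          exact List.mem_range'_1.2 ⟨by omega, by omega⟩
        have hiP : (i - P : Nat) ∈ List.range' (i - W) W :=
          List.mem_range'_1.2 ⟨by omega, by omega⟩
        simp only [pvVal]
        constructor
        · intro he k hk
          have := hmin k hk
          simp only [pvVal] at this
          omega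
        · intro hall
          have h1' := hall h hhw
          have h2' := hmin _ hiP
          simp only [pvVal] at h1' h2'
          omega
      · rw [if_neg hWi, hout3, show i + 1 - W = 0 by omega, show i - W = 0 by omega]

theorem foldl_ite_append {α : Type} (l : List α) (C : α → Prop) [DecidablePred C]
    (init : List Bool) :
    l.foldl (fun acc i => if C i then acc ++ [true] else acc ++ [false]) init =
      init ++ l.map (fun i => decide (C i)) := by
  induction l generalizing init with
  | nil => simp
  | cons x xs ih =>
    simp only [List.foldl_cons, List.map_cons]
    by_cases h : C x
    · rw [if_pos h, ih]; simp [h]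
    · rw [if_neg h, ih]; simp [h]

theorem window_eq (low : List Int) (a b : Nat) (h : a + b ≤ low.length) :
    (low.drop a).take b = (List.range' a b).map (pvVal low) := by
  apply List.ext_getElem
  · simp only [List.length_take, List.length_drop, List.length_map, List.length_range']
    omega
  · intro idx h1 h2
    have hab : a + idx < low.length := by
      simp only [List.length_take, List.length_drop] at h1
      omega
    simp only [List.getElem_take, List.getElem_drop, List.getElem_map, List.getElem_range', pvVal]
    rw [show a + 1 * idx = a + idx by omega, List.getD_eq_getElem low 0 hab]

theorem pyMin_eq_iff (v : Int) (l : List Int) (hv : v ∈ l) :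
    some v = PySem.List.min? l (fun x => x) ↔ ∀ x ∈ l, v ≤ x := by
  constructor
  · intro h x hx
    exact PySem.List.min?_isMin h.symm x hx
  · intro h
    cases hmin : PySem.List.min? l (fun x => x) with
    | none =>
      rw [PySem.List.min?_eq_none_iff] at hmin
      rw [hmin] at hv
      simp at hv
    | some m =>
      have hm : m ∈ l := PySem.List.min?_mem hmin
      have h2 : m ≤ v := PySem.List.min?_isMin hmin v hv
      rw [le_antisymm (h m hm) h2]

theorem a_side (pa : Int) (low : List Int) (hpa : 1 ≤ pa) :
    get_aa21_list pa low =
      (List.range' (2 * pa).toNat (low.length - (2 * pa).toNat)).map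
        (pvFlag low pa.toNat (2 * pa).toNat) := by
  have hW2 : (2 * pa).toNat = 2 * pa.toNat := by omega
  set n := low.length with hn
  set W := (2 * pa).toNat with hWdef
  set P := pa.toNat with hPdef
  have hpaP : pa = (P : Int) := by omega
  have hwW : 2 * pa = (W : Int) := by omega
  unfold get_aa21_list
  rw [foldl_ite_append (C := fun i => PySem.List.pyGet? low (i - pa) =
      PySem.List.min? (PySem.List.slice low (some (i - 2 * pa)) (some i)) (fun x => x))]
  rw [List.nil_append, PySem.List.pyRange_one, List.map_map]
  have hM : ((n : Int) - 2 * pa).toNat = n - W := by omega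
  rw [hM, List.range'_eq_map_range, List.map_map]
  apply List.map_congr_left
  intro k hk
  rw [List.mem_range] at hk
  simp only [Function.comp_apply]
  set t := W + k with ht
  have htW : W ≤ t := by omega
  have htn : t < n := by omega
  have harg : 2 * pa + (k : Int) = (t : Int) := by omega
  rw [harg]
  have hidx : (t : Int) - pa = ((t - P : Nat) : Int) := by omega
  have hlo : (t : Int) - 2 * pa = ((t - W : Nat) : Int) := by omega
  rw [hidx, hlo, PySem.List.pyGet?_natCast, PySem.List.slice_natCast]
  have htk : t - (t - W) = W := by omega
  rw [htk]
  have hwin : (low.drop (t - W)).take W = (List.range' (t - W) W).map (pvVal low) := by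
    apply window_eq
    omega
  rw [hwin]
  have hmem : pvVal low (t - P) ∈ (List.range' (t - W) W).map (pvVal low) :=
    List.mem_map_of_mem (List.mem_range'_1.2 ⟨by omega, by omega⟩)
  have hget : low[(t - P : Nat)]? = some (pvVal low (t - P)) := by
    rw [pvVal, List.getD_eq_getElem low 0 (by omega), List.getElem?_eq_getElem (by omega)]
  rw [hget, pvFlag]
  rw [decide_eq_decide]
  rw [pyMin_eq_iff _ _ hmem]
  simp only [List.forall_mem_map]

theorem b_side (pa : Int) (low : List Int) (hpa : 1 ≤ pa) :
    get_aa21_list_alt pa low =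
      (List.range' (2 * pa).toNat (low.length - (2 * pa).toNat)).map
        (pvFlag low pa.toNat (2 * pa).toNat) := by
  unfold get_aa21_list_alt
  rw [if_neg (by omega)]
  by_cases hn : (low.length : Int) ≤ 2 * pa
  · rw [if_pos hn, show low.length - (2 * pa).toNat = 0 by omega]
    simp
  · rw [if_neg hn]
    exact (alt_invariant low pa hpa low.length).2.2

-- ===== VERDICT (by name: the statement is the Claim_ definition above) =====
theorem get_aa21_list_spec : Claim_equal_get_aa21_list := by
  intro pa low _ hpre
  unfold Spec_get_aa21_list
  rcases hpre with hpa | ⟨h0, hnil⟩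
  · rw [a_side pa low hpa, b_side pa low hpa]
  · subst h0 hnil; decide

def get_aa21_list_raises : Claim_raises_get_aa21_list := by
  unfold Claim_raises_get_aa21_list
  refine ⟨?_, by decide⟩
  intro pa low _ hr hpre
  unfold Raises_get_aa21_list at hr
  unfold Pre_get_aa21_list at hpre
  rcases hr with h | ⟨h, hne⟩ <;> rcases hpre with h2 | ⟨h2, hnil⟩
  · omega
  · omega
  · omega
  · exact hne hnil
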